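-- pv_equiv track=rewrite | github.com/ranr9131/kalshi-delta-hedging | simulate_15s.py | get_kalshi_at
-- ===== SOURCE A (Python) =====
-- def get_kalshi_at(snap, ts):
--     """Last-known YES price at or before ts (15s snap dict with int keys)."""
--     price = None
--     for t in sorted(snap):
--         if t <= ts:
--             price = snap[t]
--         else:
--             break
--     return price
-- ===== SOURCE B (Python) =====
-- def get_kalshi_at(snap, ts):
--     """Last-known YES price at or before ts (15s snap dict with int keys)."""
--     best = None
--     for t, p in snap.items():
--         if t <= ts and (best is None or best[0] < t):
--             best = (t, p)
--     return None if best is None else best[1]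
-- ===== Notes on version B (the rewrite author's own statement) =====
-- stated objective: faster
-- what changed: B replaces A's sort-the-keys-then-scan-with-break by a single unsorted pass over the dict items that tracks the entry with the largest key <= ts.
import Mathlib
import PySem

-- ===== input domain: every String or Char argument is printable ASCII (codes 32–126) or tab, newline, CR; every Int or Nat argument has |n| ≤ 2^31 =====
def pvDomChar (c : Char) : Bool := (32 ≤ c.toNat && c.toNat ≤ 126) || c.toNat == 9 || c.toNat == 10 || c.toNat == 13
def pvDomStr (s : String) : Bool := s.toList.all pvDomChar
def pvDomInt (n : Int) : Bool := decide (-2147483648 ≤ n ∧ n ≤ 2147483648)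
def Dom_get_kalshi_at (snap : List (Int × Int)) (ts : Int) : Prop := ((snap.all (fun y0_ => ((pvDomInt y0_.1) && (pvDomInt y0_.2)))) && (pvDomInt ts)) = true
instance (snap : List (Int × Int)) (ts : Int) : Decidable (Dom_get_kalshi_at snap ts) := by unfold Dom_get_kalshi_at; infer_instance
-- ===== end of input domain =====

-- B replaces A's sort-then-scan with a single pass tracking the largest key ≤ ts (objective: faster, O(n) vs O(n log n)).
-- `snap` is a Python dict: both ports build it with PySem.Dict.ofList (duplicate keys collapse, last value wins) and read it as Python does.

-- ===== PORT A =====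
-- the 'for t in sorted(snap): if t <= ts: price = snap[t] else: break' loop, break = returning the accumulator
def getKalshiLoopA (d : PySem.Dict Int Int) (ts : Int) (price : Option Int) : List Int → Option Int
  | [] => price
  | t :: rest => if t ≤ ts then getKalshiLoopA d ts (PySem.Dict.get? d t) rest else price

def get_kalshi_at (snap : List (Int × Int)) (ts : Int) : Option Int :=
  let d := PySem.Dict.ofList snap
  getKalshiLoopA d ts none (PySem.List.sorted d.keys (fun t => t) false)

-- ===== PORT B =====
-- one step of B's single pass: keep the pair with the largest key ≤ ts seen so far (earliest on ties)
def bestStep (ts : Int) (best : Option (Int × Int)) (kv : Int × Int) : Option (Int × Int) :=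
  match best with
  | none => if kv.1 ≤ ts then some kv else none
  | some b => if kv.1 ≤ ts ∧ b.1 < kv.1 then some kv else some b

def get_kalshi_at_alt (snap : List (Int × Int)) (ts : Int) : Option Int :=
  match (PySem.Dict.ofList snap).items.foldl (bestStep ts) none with
  | none => none
  | some b => some b.2

-- ===== PRECONDITION & SPEC =====
def Spec_get_kalshi_at (snap : List (Int × Int)) (ts : Int) (out : Option Int) : Prop := out = get_kalshi_at_alt snap ts
instance (snap : List (Int × Int)) (ts : Int) (out : Option Int) : Decidable (Spec_get_kalshi_at snap ts out) := by unfold Spec_get_kalshi_at; infer_instance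

-- ===== CLAIM (what is proved, stated in full; the proofs are below) =====
def Claim_equal_get_kalshi_at : Prop := ∀ (snap : List (Int × Int)) (ts : Int), Dom_get_kalshi_at snap ts → Spec_get_kalshi_at snap ts (get_kalshi_at snap ts)

-- ===== LEMMAS AND PROOFS =====

-- first-match lookup on an association list with distinct keys finds any member pair
theorem find?_of_mem_of_nodup_keys (L : List (Int × Int)) (k v : Int)
    (hnd : (L.map (·.1)).Nodup) (hm : (k, v) ∈ L) :
    L.find? (fun p => p.1 == k) = some (k, v) := by
  induction L with
  | nil => cases hm
  | cons p L ih =>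
    simp only [List.map_cons, List.nodup_cons] at hnd
    rcases List.mem_cons.mp hm with h | h
    · subst h; simp
    · have hne : ¬ (p.1 == k) = true := by
        simp only [beq_iff_eq]
        intro he
        exact hnd.1 (he ▸ List.mem_map.mpr ⟨(k, v), h, rfl⟩)
      exact (List.find?_cons_of_neg (p := fun q : Int × Int => q.1 == k) hne).trans (ih hnd.2 h)

-- B's fold: characterisation of the tracked best pair
theorem foldB_spec (ts : Int) (L : List (Int × Int)) :
    (L.foldl (bestStep ts) none = none → ∀ p ∈ L, ts < p.1) ∧
    (∀ k v, L.foldl (bestStep ts) none = some (k, v) →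
      k ≤ ts ∧ (k, v) ∈ L ∧ ∀ p ∈ L, p.1 ≤ ts → p.1 ≤ k) := by
  induction L using List.reverseRecOn with
  | nil => simp
  | append_singleton L x ih =>
    rw [List.foldl_append]
    simp only [List.foldl_cons, List.foldl_nil]
    cases hL : L.foldl (bestStep ts) none with
    | none =>
      have hall := ih.1 hL
      have hbs : bestStep ts none x = if x.1 ≤ ts then some x else none := rfl
      constructor
      · intro hn p hp
        by_cases hx : x.1 ≤ ts
        · rw [hbs, if_pos hx] at hn; cases hn
        · rcases List.mem_append.mp hp with h | h
          · exact hall p h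
          · simp only [List.mem_singleton] at h; subst h; omega
      · intro k v hs
        by_cases hx : x.1 ≤ ts
        · rw [hbs, if_pos hx] at hs
          simp only [Option.some.injEq] at hs
          subst hs
          refine ⟨hx, List.mem_append_right _ (by simp), ?_⟩
          intro p hp hple
          rcases List.mem_append.mp hp with h | h
          · exact absurd hple (by have := hall p h; omega)
          · simp only [List.mem_singleton] at h; subst h; omega
        · rw [hbs, if_neg hx] at hs; cases hs
    | some b =>
      obtain ⟨hble, hbm, hbmax⟩ := ih.2 b.1 b.2 (by rw [hL])
      have hbs : bestStep ts (some b) x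
          = if x.1 ≤ ts ∧ b.1 < x.1 then some x else some b := rfl
      constructor
      · intro hn
        rw [hbs] at hn
        by_cases hc : x.1 ≤ ts ∧ b.1 < x.1
        · rw [if_pos hc] at hn; cases hn
        · rw [if_neg hc] at hn; cases hn
      · intro k v hs
        rw [hbs] at hs
        by_cases hc : x.1 ≤ ts ∧ b.1 < x.1
        · rw [if_pos hc] at hs
          simp only [Option.some.injEq] at hs
          subst hs
          refine ⟨hc.1, List.mem_append_right _ (by simp), ?_⟩
          intro p hp hple
          rcases List.mem_append.mp hp with h | h
          · have := hbmax p h hple; omega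
          · simp only [List.mem_singleton] at h; subst h; omega
        · rw [if_neg hc] at hs
          simp only [Option.some.injEq] at hs
          have hb : b = (k, v) := hs
          subst hb
          refine ⟨hble, List.mem_append_left _ hbm, ?_⟩
          intro p hp hple
          rcases List.mem_append.mp hp with h | h
          · exact hbmax p h hple
          · simp only [List.mem_singleton] at h; subst h
            omega

-- A's loop break: if every remaining key is > ts the accumulator survives
theorem loopA_of_all_gt (d : PySem.Dict Int Int) (ts : Int) (s : List Int)
    (h : ∀ t ∈ s, ts < t) (p : Option Int) : getKalshiLoopA d ts p s = p := by
  cases s with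
  | nil => rfl
  | cons t rest =>
    have : ¬ t ≤ ts := by have := h t (by simp); omega
    simp [getKalshiLoopA, this]

-- A's loop on a sorted key list lands on the lookup of the largest key ≤ ts
theorem loopA_of_max (d : PySem.Dict Int Int) (ts k : Int) (s : List Int)
    (hsort : s.Pairwise (· ≤ ·)) (hmem : k ∈ s) (hk : k ≤ ts)
    (hmax : ∀ t ∈ s, t ≤ ts → t ≤ k) (p : Option Int) :
    getKalshiLoopA d ts p s = PySem.Dict.get? d k := by
  induction s generalizing p with
  | nil => cases hmem
  | cons t rest ih =>
    have hpw := List.pairwise_cons.mp hsort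
    have htts : t ≤ ts := by
      rcases List.mem_cons.mp hmem with h | h
      · omega
      · have := hpw.1 k h; omega
    rw [show getKalshiLoopA d ts p (t :: rest)
        = if t ≤ ts then getKalshiLoopA d ts (PySem.Dict.get? d t) rest else p from rfl,
      if_pos htts]
    by_cases hkr : k ∈ rest
    · exact ih hpw.2 hkr (fun t' ht' h' => hmax t' (List.mem_cons_of_mem _ ht') h') _
    · have hkt : k = t := by
        rcases List.mem_cons.mp hmem with h | h
        · exact h
        · exact absurd h hkr
      subst hkt
      have : ∀ u ∈ rest, ts < u := by
        intro u hu
        by_contra hle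
        have hule : u ≤ ts := by omega
        have h1 : u ≤ k := hmax u (List.mem_cons_of_mem _ hu) hule
        have h2 : k ≤ u := hpw.1 u hu
        have : u = k := by omega
        exact hkr (this ▸ hu)
      exact loopA_of_all_gt d ts rest this _

-- ===== VERDICT (by name: the statement is the Claim_ definition above) =====
theorem get_kalshi_at_spec : Claim_equal_get_kalshi_at := by
  intro snap ts _
  unfold Spec_get_kalshi_at get_kalshi_at get_kalshi_at_alt
  set d := PySem.Dict.ofList snap with hd
  set L := d.items with hL
  have hkeys : d.keys = L.map (·.1) := rfl
  have hnd : (L.map (·.1)).Nodup := by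
    rw [← hkeys]; exact PySem.Dict.nodup_keys_ofList snap
  have hmemkeys : ∀ t : Int, t ∈ PySem.List.sorted d.keys (fun t => t) false → ∃ p ∈ L, p.1 = t := by
    intro t ht
    have : t ∈ d.keys := (PySem.List.mem_sorted _ _ _ _).mp ht
    rw [hkeys] at this
    exact List.mem_map.mp this
  cases hfold : L.foldl (bestStep ts) none with
  | none =>
    have hall := (foldB_spec ts L).1 hfold
    simp only []
    exact loopA_of_all_gt d ts _ (fun t ht => by
      obtain ⟨p, hp, hpt⟩ := hmemkeys t ht
      exact hpt ▸ hall p hp) none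
  | some b =>
    obtain ⟨hble, hbm, hbmax⟩ := (foldB_spec ts L).2 b.1 b.2 (by rw [hfold])
    simp only []
    have hget : PySem.Dict.get? d b.1 = some b.2 := by
      show Option.map (·.2) (L.find? (fun p => p.1 == b.1)) = some b.2
      rw [find?_of_mem_of_nodup_keys L b.1 b.2 hnd hbm]
      rfl
    rw [loopA_of_max d ts b.1 _
      (by
        have := PySem.List.sorted_pairwise (xs := d.keys) (key := fun t : Int => t)
        simpa using this)
      (by
        apply (PySem.List.mem_sorted _ _ _ _).mpr
        rw [hkeys]
        exact List.mem_map.mpr ⟨b, hbm, rfl⟩)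
      hble
      (fun t ht hle => by
        obtain ⟨p, hp, hpt⟩ := hmemkeys t ht
        exact hpt ▸ hbmax p hp (hpt ▸ hle))
      none, hget]
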